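-- pv_equiv track=rewrite | github.com/Trushant9/Bank-Statement-Analysis | category_prediction.py | map_to_base
-- ===== SOURCE A (Python) =====
-- def map_to_base(company_names):
--     base_names = {}
--     for name in company_names:
--         base = name
--         for other_name in company_names:
--             if name != other_name and other_name.startswith(name.split()[0]):
--                 base = name.split()[0]
--                 break
--             elif other_name != name and name.startswith(other_name.split()[0]):
--                 base = other_name.split()[0]
--                 break
--         base_names.update({name:base})
--
--     return base_names
-- ===== SOURCE B (Python) =====
-- # Faster re-implementation: one pass builds prefix/first-word indexes that store, per key,
-- # the first index and the first index with a different name; each name is then resolved in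
-- # O(len(name)) dictionary lookups instead of an O(n) inner scan.
--
-- def _add(d, key, j, o):
--     e = d.get(key)
--     if e is None:
--         d[key] = (j, o, None)
--     elif e[2] is None and o != e[1]:
--         d[key] = (e[0], e[1], j)
--
-- def _resolve(e, name):
--     if e is None:
--         return None
--     j1, o1, j2 = e
--     return j1 if o1 != name else j2
--
-- def _best(W, p, name, c2):
--     j = _resolve(W.get(p), name)
--     if j is None:
--         return c2
--     if c2 is None or j < c2[0]:
--         return (j, p)
--     return c2
--
-- def map_to_base(company_names):
--     P = {}  # prefix of a name -> (first index, its name, first index with a different name)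
--     W = {}  # first word       -> (first index, its name, first index with a different name)
--     F = {}  # name -> its first word
--     for j, o in enumerate(company_names):
--         f = o.split()[0]
--         if o not in F:
--             F[o] = f
--         _add(P, "", j, o)
--         p = ""
--         for ch in o:
--             p += ch
--             _add(P, p, j, o)
--         _add(W, f, j, o)
--     result = {}
--     for name in company_names:
--         f = F[name]
--         c1 = _resolve(P.get(f), name)
--         c2 = _best(W, "", name, None)
--         p = ""
--         for ch in name:
--             p += ch
--             c2 = _best(W, p, name, c2)
--         if c1 is None and c2 is None:
--             base = name
--         elif c2 is None or (c1 is not None and c1 <= c2[0]):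
--             base = f
--         else:
--             base = c2[1]
--         result[name] = base
--     return result
-- ===== Notes on version B (the rewrite author's own statement) =====
-- stated objective: faster
-- what changed: Replaces the O(n) inner scan per name by two dictionaries built in one pass (every prefix of every name, and every first word, each storing the first index and the first index carrying a different name), so each name is resolved with O(len(name)) lookups and the winner is chosen by comparing the two minimal indices.
-- outside the precondition, e.g. on map_to_base(['  ']): A returns {'  ': '  '}, B raises IndexError; on map_to_base(['', '']): A returns {'': ''}, B raises IndexError
import Mathlib
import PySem

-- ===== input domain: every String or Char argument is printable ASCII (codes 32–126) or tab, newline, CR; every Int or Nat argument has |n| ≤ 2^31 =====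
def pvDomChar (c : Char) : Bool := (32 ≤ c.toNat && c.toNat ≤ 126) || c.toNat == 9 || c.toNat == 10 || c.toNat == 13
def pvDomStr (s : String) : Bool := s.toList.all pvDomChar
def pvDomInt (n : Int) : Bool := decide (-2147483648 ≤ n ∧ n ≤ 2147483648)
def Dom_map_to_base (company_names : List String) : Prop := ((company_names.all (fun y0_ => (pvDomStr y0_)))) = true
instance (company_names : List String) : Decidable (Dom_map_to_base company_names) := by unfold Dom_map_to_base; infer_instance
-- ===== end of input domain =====

-- B replaces A's O(n) inner scan per name by prefix/first-word dictionaries built in one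
-- pass, resolving each name with O(len(name)) lookups (objective: faster).

-- ===== PORT A =====
-- name.split()[0] (under Pre_ the split is nonempty; getD "" is never reached there)
def pvFw (s : String) : String := (PySem.List.pyGet? (PySem.Str.split₀ s) 0).getD ""

-- A's inner 'for other_name in company_names: … break' loop
def pvBaseA (name : String) : List String → String
  | [] => name
  | o :: rest =>
    if name ≠ o ∧ PySem.Str.startswith o (pvFw name) = true then pvFw name
    else if o ≠ name ∧ PySem.Str.startswith name (pvFw o) = true then pvFw o
    else pvBaseA name rest

def map_to_base (company_names : List String) : List (String × String) :=
  (company_names.foldl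
    (fun (d : PySem.Dict String String) name => d.insert name (pvBaseA name company_names))
    PySem.Dict.empty).items

-- ===== PORT B =====
-- dictionary entry: (first index j1, its name, first later index whose name differs)
-- _add(d, key, j, o)
def pvAdd (d : PySem.Dict String (Int × String × Option Int)) (key : String) (j : Int)
    (o : String) : PySem.Dict String (Int × String × Option Int) :=
  match d.get? key with
  | none => d.insert key (j, o, none)
  | some (j1, o1, j2) => if j2 = none ∧ o ≠ o1 then d.insert key (j1, o1, some j) else d

-- _resolve(e, name)
def pvResolve (e : Option (Int × String × Option Int)) (name : String) : Option Int :=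
  match e with
  | none => none
  | some (j1, o1, j2) => if o1 ≠ name then some j1 else j2

-- _best(W, p, name, c2)
def pvBest (W : PySem.Dict String (Int × String × Option Int)) (p name : String)
    (c2 : Option (Int × String)) : Option (Int × String) :=
  match pvResolve (W.get? p) name with
  | none => c2
  | some j =>
    match c2 with
    | none => some (j, p)
    | some c => if j < c.1 then some (j, p) else c2

-- the inner "p += ch; _add(P, p, j, o)" loop body
def pvStepPrefix (j : Int) (o : String)
    (s : PySem.Dict String (Int × String × Option Int) × String) (ch : Char) :
    PySem.Dict String (Int × String × Option Int) × String :=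
  let p := s.2.push ch
  (pvAdd s.1 p j o, p)

-- per-name updates of the three dictionaries (independent of each other)
def pvStepP (P : PySem.Dict String (Int × String × Option Int)) (q : Int × String) :
    PySem.Dict String (Int × String × Option Int) :=
  (q.2.toList.foldl (pvStepPrefix q.1 q.2) (pvAdd P "" q.1 q.2, "")).1

def pvStepW (W : PySem.Dict String (Int × String × Option Int)) (q : Int × String) :
    PySem.Dict String (Int × String × Option Int) :=
  pvAdd W (pvFw q.2) q.1 q.2

def pvStepF (F : PySem.Dict String String) (q : Int × String) : PySem.Dict String String :=
  if F.contains q.2 then F else F.insert q.2 (pvFw q.2)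

-- the "for j, o in enumerate(company_names)" building loop
def pvBuild (company_names : List String) :
    PySem.Dict String (Int × String × Option Int) ×
    PySem.Dict String (Int × String × Option Int) × PySem.Dict String String :=
  (PySem.List.enumerate company_names 0).foldl
    (fun s q => (pvStepP s.1 q, pvStepW s.2.1 q, pvStepF s.2.2 q))
    (PySem.Dict.empty, PySem.Dict.empty, PySem.Dict.empty)

-- the per-name resolution (second loop body)
def pvQuery (P W : PySem.Dict String (Int × String × Option Int))
    (F : PySem.Dict String String) (name : String) : String :=
  let f := (F.get? name).getD ""
  let c1 := pvResolve (P.get? f) name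
  let c2 := (name.toList.foldl
      (fun (s : Option (Int × String) × String) ch =>
        let p := s.2.push ch
        (pvBest W p name s.1, p))
      (pvBest W "" name none, "")).1
  match c1, c2 with
  | none, none => name
  | some _, none => f
  | none, some c => c.2
  | some j1, some c => if j1 ≤ c.1 then f else c.2

def map_to_base_alt (company_names : List String) : List (String × String) :=
  let t := pvBuild company_names
  (company_names.foldl
    (fun (d : PySem.Dict String String) name => d.insert name (pvQuery t.1 t.2.1 t.2.2 name))
    PySem.Dict.empty).items

-- ===== PRECONDITION & SPEC =====
-- Pre_ excludes lists containing a whitespace-only (wordless) name: there A's name.split()[0]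
-- raises IndexError as soon as any other distinct name is present, and B's eager first-word
-- indexing raises even on the degenerate lists (all elements equal) on which A still returns.
def Pre_map_to_base (company_names : List String) : Prop :=
  ∀ s ∈ company_names, PySem.Str.split₀ s ≠ []
instance (company_names : List String) : Decidable (Pre_map_to_base company_names) := by
  unfold Pre_map_to_base; infer_instance
def pvWitness_map_to_base : List String := ["acme inc", "acme", "beta llc"]

def Spec_map_to_base (company_names : List String) (out : List (String × String)) : Prop :=
  out = map_to_base_alt company_names
instance (company_names : List String) (out : List (String × String)) :
    Decidable (Spec_map_to_base company_names out) := by unfold Spec_map_to_base; infer_instance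

-- ===== CLAIM (what is proved, stated in full; the proofs are below) =====
def Claim_equal_map_to_base : Prop := ∀ (company_names : List String),
  Dom_map_to_base company_names → Pre_map_to_base company_names →
  Spec_map_to_base company_names (map_to_base company_names)

-- ===== LEMMAS AND PROOFS =====

-- the two conditions of A's inner loop, as predicates on an (index, name) pair
def pvC1 (name : String) (q : Int × String) : Bool :=
  decide (name ≠ q.2) && PySem.Str.startswith q.2 (pvFw name)
def pvC2 (name : String) (q : Int × String) : Bool :=
  decide (q.2 ≠ name) && PySem.Str.startswith name (pvFw q.2)

-- canonical entry for the (filtered) occurrence list of one key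
def pvEntryOf : List (Int × String) → Option (Int × String × Option Int)
  | [] => none
  | (j, o) :: rest => some (j, o, (rest.find? (fun q => decide (q.2 ≠ o))).map (·.1))

def pvAddEntry (e : Option (Int × String × Option Int)) (j : Int) (o : String) :
    Option (Int × String × Option Int) :=
  match e with
  | none => some (j, o, none)
  | some (j1, o1, j2) => if j2 = none ∧ o ≠ o1 then some (j1, o1, some j) else some (j1, o1, j2)

-- the list of keys the prefix loop visits after the initial ""
def pvPrefAux : String → List Char → List String
  | _, [] => []
  | p, c :: cs => (p.push c) :: pvPrefAux (p.push c) cs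

def pvPrefixes (o : String) : List String := "" :: pvPrefAux "" o.toList

def pvMerge (a b : Option (Int × String)) : Option (Int × String) :=
  match a, b with
  | none, b => b
  | some x, none => some x
  | some x, some y => if x.1 ≤ y.1 then some x else some y

theorem pvEntryOf_append (l : List (Int × String)) (q : Int × String) :
    pvEntryOf (l ++ [q]) = pvAddEntry (pvEntryOf l) q.1 q.2 := by
  obtain ⟨j, o⟩ := q
  match l with
  | [] => rfl
  | (j1, o1) :: rest =>
    simp only [pvEntryOf, List.cons_append, pvAddEntry, List.find?_append]
    cases hf : rest.find? (fun q => decide (q.2 ≠ o1)) with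
    | some q => simp [hf]
    | none =>
      by_cases ho : o = o1
      · simp [hf, ho, List.find?]
      · simp [hf, ho, List.find?]

theorem pvResolve_entryOf_filter (l : List (Int × String)) (pk : Int × String → Bool)
    (name : String) :
    pvResolve (pvEntryOf (l.filter pk)) name
      = (l.find? (fun q => pk q && decide (q.2 ≠ name))).map (·.1) := by
  induction l with
  | nil => rfl
  | cons q rest ih =>
    obtain ⟨j0, o0⟩ := q
    by_cases hk : pk (j0, o0)
    · rw [List.filter_cons_of_pos hk]
      by_cases hne : o0 = name
      · subst hne
        rw [List.find?_cons_of_neg (by simp)]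
        simp only [pvEntryOf, pvResolve, List.find?_filter]
        simp
      · rw [List.find?_cons_of_pos (by simp [hk, hne])]
        simp [pvEntryOf, pvResolve, hne]
    · rw [List.filter_cons_of_neg hk, List.find?_cons_of_neg (by simp [hk]), ih]

theorem pvGet?_pvAdd (d : PySem.Dict String (Int × String × Option Int)) (k key : String)
    (j : Int) (o : String) :
    (pvAdd d k j o).get? key
      = if key = k then pvAddEntry (d.get? k) j o else d.get? key := by
  unfold pvAdd pvAddEntry
  cases hg : d.get? k with
  | none => simp [PySem.Dict.get?_insert, hg]
  | some e =>
    obtain ⟨j1, o1, j2⟩ := e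
    by_cases hc : j2 = none ∧ o ≠ o1
    · simp [hc, PySem.Dict.get?_insert, hg]
    · simp only [hc, if_false]
      by_cases hkey : key = k <;> simp [hkey, hg, hc]

theorem pvGet?_foldl_pvAdd (ps : List String) (hnd : ps.Nodup)
    (d : PySem.Dict String (Int × String × Option Int)) (key : String) (j : Int) (o : String) :
    (ps.foldl (fun d p => pvAdd d p j o) d).get? key
      = if key ∈ ps then pvAddEntry (d.get? key) j o else d.get? key := by
  induction ps generalizing d with
  | nil => simp
  | cons p ps ih =>
    rw [List.foldl_cons, ih (List.Nodup.of_cons hnd)]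
    by_cases hkp : key = p
    · subst hkp
      have hnot : key ∉ ps := (List.nodup_cons.mp hnd).1
      simp [hnot, pvGet?_pvAdd]
    · by_cases hin : key ∈ ps <;> simp [hin, hkp, pvGet?_pvAdd]

theorem pvStepPrefix_foldl (j : Int) (o : String) (cs : List Char)
    (d : PySem.Dict String (Int × String × Option Int)) (p0 : String) :
    (cs.foldl (pvStepPrefix j o) (d, p0)).1
      = (pvPrefAux p0 cs).foldl (fun d p => pvAdd d p j o) d := by
  induction cs generalizing d p0 with
  | nil => rfl
  | cons c cs ih => rw [List.foldl_cons, pvStepPrefix, pvPrefAux, List.foldl_cons, ih]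

theorem pvPrefAux_toList (p0 : String) (cs : List Char) (s : String) :
    s ∈ pvPrefAux p0 cs ↔ ∃ k : Nat, k < cs.length ∧ s.toList = p0.toList ++ cs.take (k + 1) := by
  induction cs generalizing p0 with
  | nil => simp [pvPrefAux]
  | cons c cs ih =>
    simp only [pvPrefAux, List.mem_cons, ih]
    constructor
    · rintro (rfl | ⟨k, hk, he⟩)
      · exact ⟨0, by simp, by simp [String.toList_push]⟩
      · exact ⟨k + 1, by simpa using hk, by simp [he, String.toList_push]⟩
    · rintro ⟨k, hk, he⟩
      cases k with
      | zero =>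
        left
        apply String.toList_inj.mp
        simp [he, String.toList_push]
      | succ k =>
        right
        exact ⟨k, by simpa using hk, by simp [he, String.toList_push]⟩

theorem pvPrefAux_len (p0 : String) (cs : List Char) (s : String) (h : s ∈ pvPrefAux p0 cs) :
    p0.toList.length < s.toList.length := by
  obtain ⟨k, hk, he⟩ := (pvPrefAux_toList p0 cs s).mp h
  simp [he]
  omega

theorem pvPrefAux_nodup (p0 : String) (cs : List Char) : (pvPrefAux p0 cs).Nodup := by
  induction cs generalizing p0 with
  | nil => simp [pvPrefAux]
  | cons c cs ih =>
    simp only [pvPrefAux, List.nodup_cons]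
    refine ⟨fun hmem => ?_, ih _⟩
    exact absurd rfl (Nat.ne_of_lt (pvPrefAux_len _ _ _ hmem)).symm.elim

theorem pvMem_pvPrefixes (key o : String) :
    key ∈ pvPrefixes o ↔ key.toList <+: o.toList := by
  simp only [pvPrefixes, List.mem_cons, pvPrefAux_toList]
  constructor
  · rintro (rfl | ⟨k, hk, he⟩)
    · simp
    · rw [he]
      simpa using List.take_prefix (k + 1) o.toList
  · intro hpre
    rcases Nat.eq_zero_or_pos key.toList.length with hz | hpos
    · left
      apply String.toList_inj.mp
      simpa using List.length_eq_zero_iff.mp hz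
    · right
      refine ⟨key.toList.length - 1, ?_, ?_⟩
      · have := hpre.length_le
        omega
      · have : key.toList.length - 1 + 1 = key.toList.length := by omega
        rw [this]
        simpa using (List.prefix_iff_eq_take.mp hpre)

theorem pvPrefixes_nodup (o : String) : (pvPrefixes o).Nodup := by
  simp only [pvPrefixes, List.nodup_cons]
  refine ⟨fun hmem => ?_, pvPrefAux_nodup _ _⟩
  have := pvPrefAux_len _ _ _ hmem
  simp at this

theorem pvStepP_get? (P : PySem.Dict String (Int × String × Option Int)) (q : Int × String)
    (key : String) :
    (pvStepP P q).get? key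
      = if key ∈ pvPrefixes q.2 then pvAddEntry (P.get? key) q.1 q.2 else P.get? key := by
  unfold pvStepP
  rw [pvStepPrefix_foldl, pvGet?_foldl_pvAdd _ (pvPrefAux_nodup _ _), pvGet?_pvAdd]
  by_cases haux : key ∈ pvPrefAux "" q.2.toList
  · have hne : key ≠ "" := by
      intro h
      have := pvPrefAux_len _ _ _ haux
      simp [h] at this
    simp [haux, hne, pvPrefixes]
  · by_cases hemp : key = ""
    · subst hemp
      rw [if_neg haux, if_pos (show ("" : String) ∈ pvPrefixes q.2 from List.mem_cons_self),
        if_pos rfl]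
    · simp [haux, hemp, pvPrefixes]

-- build characterizations, per key, over any pair list e
theorem pvBuildP_get? (e : List (Int × String)) (key : String) :
    (e.foldl pvStepP PySem.Dict.empty).get? key
      = pvEntryOf (e.filter (fun q => decide (key ∈ pvPrefixes q.2))) := by
  induction e using List.reverseRecOn with
  | nil => simp [pvEntryOf]
  | append_singleton e x ih =>
    rw [List.foldl_append, List.foldl_cons, List.foldl_nil, pvStepP_get?, ih,
      List.filter_append, List.filter_singleton]
    by_cases hx : key ∈ pvPrefixes x.2
    · rw [if_pos hx, decide_eq_true hx, cond_true, pvEntryOf_append]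
    · rw [if_neg hx, decide_eq_false hx, cond_false, List.append_nil]

theorem pvBuildW_get? (e : List (Int × String)) (key : String) :
    (e.foldl pvStepW PySem.Dict.empty).get? key
      = pvEntryOf (e.filter (fun q => decide (pvFw q.2 = key))) := by
  induction e using List.reverseRecOn with
  | nil => simp [pvEntryOf]
  | append_singleton e x ih =>
    by_cases hx : pvFw x.2 = key
    · subst hx
      rw [List.foldl_append, List.foldl_cons, List.foldl_nil, pvStepW, pvGet?_pvAdd,
        if_pos rfl, ih, List.filter_append, List.filter_singleton, decide_eq_true rfl,
        cond_true, pvEntryOf_append]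
    · rw [List.foldl_append, List.foldl_cons, List.foldl_nil, pvStepW, pvGet?_pvAdd,
        if_neg (fun h => hx h.symm), ih, List.filter_append, List.filter_singleton,
        decide_eq_false hx, cond_false, List.append_nil]

theorem pvBuildF_sound (e : List (Int × String)) (d : PySem.Dict String String)
    (h : ∀ k v, d.get? k = some v → v = pvFw k) (k : String) (v : String) :
    (e.foldl pvStepF d).get? k = some v → v = pvFw k := by
  induction e generalizing d with
  | nil => exact h k v
  | cons q e ih =>
    rw [List.foldl_cons]
    refine ih _ (fun k' v' hg => ?_)
    unfold pvStepF at hg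
    by_cases hc : d.contains q.2
    · rw [if_pos hc] at hg
      exact h k' v' hg
    · rw [if_neg hc, PySem.Dict.get?_insert] at hg
      by_cases hk : k' = q.2
      · rw [if_pos hk] at hg
        rw [hk]
        exact (Option.some_inj.mp hg).symm ▸ rfl
      · rw [if_neg hk] at hg
        exact h k' v' hg

theorem pvBuildF_isSome (e : List (Int × String)) (d : PySem.Dict String String) (name : String)
    (h : name ∈ e.map (·.2) ∨ ((d.get? name).isSome = true)) :
    ((e.foldl pvStepF d).get? name).isSome = true := by
  induction e generalizing d with
  | nil => simpa using h
  | cons q e ih =>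
    rw [List.foldl_cons]
    refine ih _ ?_
    have hstep : ∀ k, ((d.get? k).isSome = true) → (((pvStepF d q).get? k).isSome = true) := by
      intro k hk
      unfold pvStepF
      by_cases hc : d.contains q.2
      · simpa [hc] using hk
      · rw [if_neg hc, PySem.Dict.get?_insert]
        by_cases hkq : k = q.2 <;> simp [hkq, hk]
    rcases h with hmem | hs
    · simp only [List.map_cons, List.mem_cons] at hmem
      rcases hmem with heq | hmem
      · right
        unfold pvStepF
        by_cases hc : d.contains q.2
        · rw [if_pos hc, heq]
          have := PySem.Dict.contains_eq_isSome_get? (d := d) (k := q.2)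
          rw [hc] at this
          exact this.symm
        · rw [if_neg hc, heq]
          simp [PySem.Dict.get?_insert]
      · exact Or.inl hmem
    · exact Or.inr (hstep name hs)

theorem pvBuild_aux (e : List (Int × String)) (P W : PySem.Dict String (Int × String × Option Int))
    (F : PySem.Dict String String) :
    e.foldl (fun s q => (pvStepP s.1 q, pvStepW s.2.1 q, pvStepF s.2.2 q)) (P, W, F)
      = (e.foldl pvStepP P, e.foldl pvStepW W, e.foldl pvStepF F) := by
  induction e generalizing P W F with
  | nil => rfl
  | cons q e ih => simp only [List.foldl_cons, ih]

theorem pvBuild_eq (l : List String) :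
    pvBuild l = ((PySem.List.enumerate l 0).foldl pvStepP PySem.Dict.empty,
                 (PySem.List.enumerate l 0).foldl pvStepW PySem.Dict.empty,
                 (PySem.List.enumerate l 0).foldl pvStepF PySem.Dict.empty) := by
  unfold pvBuild
  exact pvBuild_aux _ _ _ _

-- A's scan as a find? over the enumerated list
theorem pvBaseA_eq_find (name : String) (l : List String) (s : Int) :
    pvBaseA name l
      = match (PySem.List.enumerate l s).find? (fun q => pvC1 name q || pvC2 name q) with
        | none => name
        | some q => if pvC1 name q then pvFw name else pvFw q.2 := by
  induction l generalizing s with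
  | nil => rfl
  | cons o rest ih =>
    rw [PySem.List.enumerate_cons]
    by_cases h1 : pvC1 name (s, o) = true
    · rw [List.find?_cons_of_pos (by simp [h1])]
      have h1' : name ≠ o ∧ PySem.Str.startswith o (pvFw name) = true := by
        simpa [pvC1, -PySem.Str.startswith_eq] using h1
      show pvBaseA name (o :: rest) = if pvC1 name (s, o) = true then pvFw name else pvFw (s, o).2
      rw [if_pos h1]
      simp only [pvBaseA]
      rw [if_pos h1']
    · by_cases h2 : pvC2 name (s, o) = true
      · rw [List.find?_cons_of_pos (by simp [h2])]
        have h2' : o ≠ name ∧ PySem.Str.startswith name (pvFw o) = true := by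
          simpa [pvC2, -PySem.Str.startswith_eq] using h2
        have h1' : ¬ (name ≠ o ∧ PySem.Str.startswith o (pvFw name) = true) := by
          intro hc
          exact h1 (by simp [pvC1, -PySem.Str.startswith_eq, hc.1, hc.2])
        show pvBaseA name (o :: rest)
            = if pvC1 name (s, o) = true then pvFw name else pvFw (s, o).2
        rw [if_neg h1]
        simp only [pvBaseA]
        rw [if_neg h1', if_pos h2']
      · rw [List.find?_cons_of_neg (by simp [h1, h2])]
        have h1' : ¬ (name ≠ o ∧ PySem.Str.startswith o (pvFw name) = true) := by
          intro hc
          exact h1 (by simp [pvC1, -PySem.Str.startswith_eq, hc.1, hc.2])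
        have h2' : ¬ (o ≠ name ∧ PySem.Str.startswith name (pvFw o) = true) := by
          intro hc
          exact h2 (by simp [pvC2, -PySem.Str.startswith_eq, hc.1, hc.2])
        simp only [pvBaseA]
        rw [if_neg h1', if_neg h2']
        exact ih (s + 1)

theorem pvFind?_or (e : List (Int × String)) (p1 p2 : Int × String → Bool)
    (hp : e.Pairwise (fun a b => a.1 < b.1)) :
    e.find? (fun q => p1 q || p2 q) = pvMerge (e.find? p1) (e.find? p2) := by
  induction e with
  | nil => rfl
  | cons q e ih =>
    rw [List.pairwise_cons] at hp
    by_cases h1 : p1 q = true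
    · rw [List.find?_cons_of_pos (by simp [h1]), List.find?_cons_of_pos h1]
      by_cases h2 : p2 q = true
      · rw [List.find?_cons_of_pos h2]
        simp [pvMerge]
      · rw [List.find?_cons_of_neg (by simp [h2])]
        cases hf : e.find? p2 with
        | none => simp [pvMerge]
        | some y =>
          have hy : q.1 < y.1 := hp.1 _ (List.mem_of_find?_eq_some hf)
          simp [pvMerge, le_of_lt hy]
    · by_cases h2 : p2 q = true
      · rw [List.find?_cons_of_pos (by simp [h1, h2]), List.find?_cons_of_neg (by simp [h1]),
          List.find?_cons_of_pos h2]
        cases hf : e.find? p1 with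
        | none => simp [pvMerge]
        | some y =>
          have hy : q.1 < y.1 := hp.1 _ (List.mem_of_find?_eq_some hf)
          simp [pvMerge, not_le.mpr hy]
      · rw [List.find?_cons_of_neg (by simp [h1, h2]), List.find?_cons_of_neg (by simp [h1]),
          List.find?_cons_of_neg (by simp [h2]), ih hp.2]

theorem pvFind?_min (e : List (Int × String)) (p : Int × String → Bool)
    (hp : e.Pairwise (fun a b => a.1 < b.1)) (q1 : Int × String) (h : e.find? p = some q1)
    (q2 : Int × String) (hq2 : q2 ∈ e) (hpq2 : p q2 = true) : q1.1 ≤ q2.1 := by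
  induction e with
  | nil => cases hq2
  | cons a e ih =>
    rw [List.pairwise_cons] at hp
    by_cases ha : p a = true
    · rw [List.find?_cons_of_pos ha, Option.some_inj] at h
      subst h
      rcases List.mem_cons.mp hq2 with rfl | hq2
      · exact le_refl _
      · exact le_of_lt (hp.1 _ hq2)
    · rw [List.find?_cons_of_neg (by simp [ha])] at h
      rcases List.mem_cons.mp hq2 with rfl | hq2
      · exact absurd hpq2 ha
      · exact ih hp.2 h hq2

theorem pvStartswith_eq (o key : String) :
    decide (key ∈ pvPrefixes o) = PySem.Str.startswith o key := by
  by_cases h : key.toList <+: o.toList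
  · rw [decide_eq_true ((pvMem_pvPrefixes key o).mpr h)]
    exact ((PySem.Str.startswith_eq o key).trans
      ((PySem.Chars.startswith_iff _ _).mpr h)).symm
  · rw [decide_eq_false (fun hm => h ((pvMem_pvPrefixes key o).mp hm))]
    by_contra hb
    have : PySem.Str.startswith o key = true := by
      cases hsw : PySem.Str.startswith o key
      · exact absurd hsw.symm hb
      · rfl
    exact h ((PySem.Chars.startswith_iff _ _).mp ((PySem.Str.startswith_eq o key).symm.trans this))

-- the c2 accumulation loop computes the find? over the union of the first-word classes
theorem pvFind?_congr (e : List (Int × String)) (p q : Int × String → Bool)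
    (h : ∀ x, p x = q x) : e.find? p = e.find? q :=
  congrArg (fun p => e.find? p) (funext h)

theorem pvBest_fold (e : List (Int × String)) (hp : e.Pairwise (fun a b => a.1 < b.1))
    (W : PySem.Dict String (Int × String × Option Int))
    (hW : ∀ key, W.get? key = pvEntryOf (e.filter (fun q => decide (pvFw q.2 = key))))
    (name : String) (ps : List String) (hnd : ps.Nodup) (g : String → Bool)
    (hg : ∀ p ∈ ps, g p = false) (acc : Option (Int × String))
    (hacc : acc = (e.find? (fun q => decide (q.2 ≠ name) && g (pvFw q.2))).map
        (fun q => (q.1, pvFw q.2))) :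
    ps.foldl (fun a p => pvBest W p name a) acc
      = (e.find? (fun q => decide (q.2 ≠ name) && (g (pvFw q.2) || decide (pvFw q.2 ∈ ps)))).map
          (fun q => (q.1, pvFw q.2)) := by
  induction ps generalizing g acc with
  | nil =>
    rw [List.foldl_nil, hacc]
    exact congrArg _ (pvFind?_congr e _ _ (fun q => by simp))
  | cons p ps ih =>
    have hp_not : p ∉ ps := (List.nodup_cons.mp hnd).1
    have hstep : pvBest W p name acc
        = (e.find? (fun q => decide (q.2 ≠ name)
            && (g (pvFw q.2) || decide (pvFw q.2 = p)))).map (fun q => (q.1, pvFw q.2)) := by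
      have hdist : (fun q : Int × String => decide (q.2 ≠ name)
            && (g (pvFw q.2) || decide (pvFw q.2 = p)))
          = fun q => (decide (q.2 ≠ name) && g (pvFw q.2))
              || (decide (q.2 ≠ name) && decide (pvFw q.2 = p)) := by
        funext q
        exact Bool.and_or_distrib_left _ _ _
      rw [hdist, pvFind?_or _ _ _ hp]
      have hres : pvResolve (W.get? p) name
          = (e.find? (fun q => decide (q.2 ≠ name) && decide (pvFw q.2 = p))).map (·.1) := by
        rw [hW p, pvResolve_entryOf_filter]
        exact congrArg _ (pvFind?_congr e _ _ (fun q => Bool.and_comm _ _))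
      unfold pvBest
      rw [hres, hacc]
      cases hA2 : e.find? (fun q => decide (q.2 ≠ name) && decide (pvFw q.2 = p)) with
      | none =>
        cases hA1 : e.find? (fun q => decide (q.2 ≠ name) && g (pvFw q.2)) <;> simp [pvMerge]
      | some q2 =>
        have hfw2 : pvFw q2.2 = p := by
          have := List.find?_some hA2
          simp only [Bool.and_eq_true, decide_eq_true_eq] at this
          exact this.2
        cases hA1 : e.find? (fun q => decide (q.2 ≠ name) && g (pvFw q.2)) with
        | none => simp [pvMerge, hfw2]
        | some q1 =>
          by_cases hlt : q2.1 < q1.1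
          · simp [pvMerge, hlt, not_le.mpr hlt, hfw2]
          · simp [pvMerge, hlt, not_lt.mp hlt]
    rw [List.foldl_cons,
      ih (List.Nodup.of_cons hnd) (fun x => g x || decide (x = p))
        (fun r hr => by
          have h1 := hg r (List.mem_cons_of_mem _ hr)
          have h2 : r ≠ p := fun h => hp_not (h ▸ hr)
          simp [h1, h2])
        _ hstep]
    exact congrArg _ (pvFind?_congr e _ _ (fun q => by
      simp only [List.mem_cons, Bool.decide_or, Bool.or_assoc]))

theorem pvQuery_fold (W : PySem.Dict String (Int × String × Option Int)) (name : String)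
    (cs : List Char) (acc : Option (Int × String)) (p0 : String) :
    (cs.foldl (fun (s : Option (Int × String) × String) ch =>
        let p := s.2.push ch
        (pvBest W p name s.1, p)) (acc, p0)).1
      = (pvPrefAux p0 cs).foldl (fun a p => pvBest W p name a) acc := by
  induction cs generalizing acc p0 with
  | nil => rfl
  | cons c cs ih => rw [List.foldl_cons, pvPrefAux, List.foldl_cons]; exact ih _ _

theorem pvQuery_eq_pvBaseA (l : List String) (name : String) (hmem : name ∈ l) :
    pvQuery (pvBuild l).1 (pvBuild l).2.1 (pvBuild l).2.2 name = pvBaseA name l := by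
  rw [pvBuild_eq]
  dsimp only
  set e := PySem.List.enumerate l 0 with he
  have hp : e.Pairwise (fun a b => a.1 < b.1) := PySem.List.pairwise_lt_enumerate l 0
  have hfs : (e.foldl pvStepF PySem.Dict.empty).get? name = some (pvFw name) := by
    have h1 : name ∈ e.map (·.2) := by
      rw [he, PySem.List.map_snd_enumerate]
      exact hmem
    obtain ⟨v, hv⟩ := Option.isSome_iff_exists.mp (pvBuildF_isSome e _ name (Or.inl h1))
    rw [hv, pvBuildF_sound e PySem.Dict.empty
      (by intro k v h; simp [PySem.Dict.get?_empty] at h) name v hv]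
  have hc1 : pvResolve ((e.foldl pvStepP PySem.Dict.empty).get? (pvFw name)) name
      = (e.find? (fun q => pvC1 name q)).map (·.1) := by
    rw [pvBuildP_get?, pvResolve_entryOf_filter]
    refine congrArg _ (pvFind?_congr e _ _ (fun q => ?_))
    rw [pvStartswith_eq]
    show _ = (decide (name ≠ q.2) && PySem.Str.startswith q.2 (pvFw name))
    rw [Bool.and_comm]
    congr 1
    exact decide_eq_decide.mpr ne_comm
  have hc2 : ((pvPrefixes name).foldl
        (fun a p => pvBest (e.foldl pvStepW PySem.Dict.empty) p name a) none)
      = (e.find? (fun q => pvC2 name q)).map (fun q => (q.1, pvFw q.2)) := by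
    rw [pvBest_fold e hp _ (fun key => pvBuildW_get? e key) name (pvPrefixes name)
      (pvPrefixes_nodup name) (fun _ => false) (fun _ _ => rfl) none
      (by
        have hnone : e.find? (fun q => decide (q.2 ≠ name) && (fun _ => false) (pvFw q.2)) = none :=
          List.find?_eq_none.mpr (fun x _ => by simp)
        rw [hnone]
        rfl)]
    refine congrArg _ (pvFind?_congr e _ _ (fun q => ?_))
    show (decide (q.2 ≠ name) && (false || decide (pvFw q.2 ∈ pvPrefixes name))) = _
    rw [Bool.false_or, pvStartswith_eq]
    rfl
  rw [pvBaseA_eq_find name l 0, ← he, pvFind?_or e _ _ hp]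
  unfold pvQuery
  rw [hfs]
  rw [pvQuery_fold]
  have hpref : ("" : String) :: pvPrefAux "" name.toList = pvPrefixes name := rfl
  rw [show (pvPrefAux "" name.toList).foldl
        (fun a p => pvBest (e.foldl pvStepW PySem.Dict.empty) p name a)
        (pvBest (e.foldl pvStepW PySem.Dict.empty) "" name none)
      = ((pvPrefixes name).foldl
        (fun a p => pvBest (e.foldl pvStepW PySem.Dict.empty) p name a) none) from by
    rw [← hpref, List.foldl_cons]]
  rw [hc2]
  show (match pvResolve ((e.foldl pvStepP PySem.Dict.empty).get? ((some (pvFw name)).getD "")) name,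
        (e.find? (fun q => pvC2 name q)).map (fun q => (q.1, pvFw q.2)) with
    | none, none => name
    | some _, none => (some (pvFw name)).getD ""
    | none, some c => c.2
    | some j1, some c => if j1 ≤ c.1 then (some (pvFw name)).getD "" else c.2)
    = _
  rw [show ((some (pvFw name)).getD "") = pvFw name from rfl, hc1]
  cases hF1 : e.find? (fun q => pvC1 name q) with
  | none =>
    cases hF2 : e.find? (fun q => pvC2 name q) with
    | none => simp [pvMerge]
    | some q2 =>
      have hnc1 : ¬ pvC1 name q2 = true :=
        List.find?_eq_none.mp hF1 q2 (List.mem_of_find?_eq_some hF2)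
      simp [pvMerge, hnc1]
  | some q1 =>
    have hc1q1 : pvC1 name q1 = true := List.find?_some hF1
    cases hF2 : e.find? (fun q => pvC2 name q) with
    | none => simp [pvMerge, hc1q1]
    | some q2 =>
      by_cases hle : q1.1 ≤ q2.1
      · simp [pvMerge, hle, hc1q1]
      · have hnc1 : ¬ pvC1 name q2 = true := fun hc =>
          hle (pvFind?_min e _ hp q1 hF1 q2 (List.mem_of_find?_eq_some hF2) hc)
        simp [pvMerge, hle, hnc1]

-- ===== VERDICT (by name: the statement is the Claim_ definition above) =====
theorem map_to_base_spec : Claim_equal_map_to_base := by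
  intro l _ _
  show map_to_base l = map_to_base_alt l
  unfold map_to_base map_to_base_alt
  refine congrArg PySem.Dict.items ?_
  apply PySem.List.foldl_congr_mem
  intro acc name h
  rw [pvQuery_eq_pvBaseA l name h]
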